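-- pv_equiv track=rewrite | github.com/edesarrollo2021/OSITECH | base_mexico/pyfiscal/utils_company.py | get_consonant
-- ===== SOURCE A (Python) =====
-- def get_consonant(consonant):
--     "Get consonant."
--     consonants = (
--         'B', 'C', 'D', 'F', 'G', 'H', 'J', 'K', 'L', 'M', 'N',
--         'P', 'Q', 'R', 'S', 'T', 'V', 'W', 'X', 'Y', 'Z'
--     )
--
--     for item in consonants:
--         if item == consonant:
--             return True
--             break
--     return False
-- ===== SOURCE B (Python) =====
-- def get_consonant(consonant):
--     "Get consonant."
--     return (isinstance(consonant, str) and len(consonant) == 1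
--             and 'A' <= consonant <= 'Z' and consonant not in 'AEIOU')
-- ===== Notes on version B (the rewrite author's own statement) =====
-- stated objective: idiomatic
-- what changed: Replaced the linear scan over a 21-element tuple with a closed-form predicate: the argument is a single uppercase ASCII letter that is not a vowel.
import Mathlib
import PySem

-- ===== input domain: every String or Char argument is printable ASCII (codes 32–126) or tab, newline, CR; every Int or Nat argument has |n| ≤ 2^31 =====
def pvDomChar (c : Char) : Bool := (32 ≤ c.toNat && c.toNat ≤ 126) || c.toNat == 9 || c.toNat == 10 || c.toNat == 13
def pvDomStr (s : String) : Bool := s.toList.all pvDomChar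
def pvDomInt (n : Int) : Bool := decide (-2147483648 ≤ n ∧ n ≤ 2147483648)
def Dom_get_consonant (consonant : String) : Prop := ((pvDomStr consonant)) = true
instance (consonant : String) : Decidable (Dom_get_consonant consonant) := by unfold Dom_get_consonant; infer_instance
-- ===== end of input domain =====

-- B replaces the 21-element tuple scan with a closed-form test (single uppercase ASCII letter, not a vowel); objective: idiomatic.


-- ===== PORT A =====
-- `for item in consonants: if item == consonant: return True` / `return False` = early-exit scan = List.any
def get_consonant (consonant : String) : Bool :=
  ["B", "C", "D", "F", "G", "H", "J", "K", "L", "M", "N",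
   "P", "Q", "R", "S", "T", "V", "W", "X", "Y", "Z"].any (fun item => item == consonant)

-- ===== PORT B =====
-- len(consonant) == 1 and 'A' <= consonant <= 'Z' and consonant not in 'AEIOU'
-- (Python's string comparison on a length-1 string is exactly comparison of its single character)
def get_consonant_alt (consonant : String) : Bool :=
  match consonant.toList with
  | [c] => ('A' ≤ c && c ≤ 'Z') && !("AEIOU".toList.contains c)
  | _ => false

-- ===== PRECONDITION & SPEC =====
def Spec_get_consonant (consonant : String) (out : Bool) : Prop := out = get_consonant_alt consonant
instance (consonant : String) (out : Bool) : Decidable (Spec_get_consonant consonant out) := by unfold Spec_get_consonant; infer_instance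

-- ===== CLAIM (what is proved, stated in full; the proofs are below) =====
def Claim_equal_get_consonant : Prop := ∀ (consonant : String), Dom_get_consonant consonant → Spec_get_consonant consonant (get_consonant consonant)

-- ===== LEMMAS AND PROOFS =====
theorem char_eq_toNat (c d : Char) : (c = d ↔ c.toNat = d.toNat) :=
  ⟨fun h => h ▸ rfl, fun h => Char.ext (UInt32.toNat_inj.mp h)⟩

theorem char_le_toNat (c d : Char) : (c ≤ d ↔ c.toNat ≤ d.toNat) :=
  UInt32.le_iff_toNat_le

-- ===== VERDICT (by name: the statement is the Claim_ definition above) =====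
theorem get_consonant_spec : Claim_equal_get_consonant := by
  intro s _
  unfold Spec_get_consonant get_consonant get_consonant_alt
  rcases hl : s.toList with _ | ⟨c, _ | ⟨d, t⟩⟩
  · simp [String.ext_iff, hl]
  · simp only [List.any_cons, List.any_nil, Bool.or_false]
    rw [Bool.eq_iff_iff]
    simp only [beq_iff_eq, Bool.or_eq_true, Bool.and_eq_true, decide_eq_true_eq,
      Bool.not_eq_true', decide_eq_false_iff_not, String.ext_iff, hl,
      show ("B" : String).toList = ['B'] from rfl,
      show ("C" : String).toList = ['C'] from rfl,
      show ("D" : String).toList = ['D'] from rfl,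
      show ("F" : String).toList = ['F'] from rfl,
      show ("G" : String).toList = ['G'] from rfl,
      show ("H" : String).toList = ['H'] from rfl,
      show ("J" : String).toList = ['J'] from rfl,
      show ("K" : String).toList = ['K'] from rfl,
      show ("L" : String).toList = ['L'] from rfl,
      show ("M" : String).toList = ['M'] from rfl,
      show ("N" : String).toList = ['N'] from rfl,
      show ("P" : String).toList = ['P'] from rfl,
      show ("Q" : String).toList = ['Q'] from rfl,
      show ("R" : String).toList = ['R'] from rfl,
      show ("S" : String).toList = ['S'] from rfl,
      show ("T" : String).toList = ['T'] from rfl,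
      show ("V" : String).toList = ['V'] from rfl,
      show ("W" : String).toList = ['W'] from rfl,
      show ("X" : String).toList = ['X'] from rfl,
      show ("Y" : String).toList = ['Y'] from rfl,
      show ("Z" : String).toList = ['Z'] from rfl,
      show ("AEIOU" : String).toList = ['A', 'E', 'I', 'O', 'U'] from rfl,
      List.cons.injEq, and_true, List.contains_eq_mem, List.mem_cons, List.not_mem_nil,
      or_false, char_eq_toNat, char_le_toNat,
      show 'A'.toNat = 65 from rfl,
      show 'B'.toNat = 66 from rfl,
      show 'C'.toNat = 67 from rfl,
      show 'D'.toNat = 68 from rfl,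
      show 'E'.toNat = 69 from rfl,
      show 'F'.toNat = 70 from rfl,
      show 'G'.toNat = 71 from rfl,
      show 'H'.toNat = 72 from rfl,
      show 'I'.toNat = 73 from rfl,
      show 'J'.toNat = 74 from rfl,
      show 'K'.toNat = 75 from rfl,
      show 'L'.toNat = 76 from rfl,
      show 'M'.toNat = 77 from rfl,
      show 'N'.toNat = 78 from rfl,
      show 'O'.toNat = 79 from rfl,
      show 'P'.toNat = 80 from rfl,
      show 'Q'.toNat = 81 from rfl,
      show 'R'.toNat = 82 from rfl,
      show 'S'.toNat = 83 from rfl,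
      show 'T'.toNat = 84 from rfl,
      show 'U'.toNat = 85 from rfl,
      show 'V'.toNat = 86 from rfl,
      show 'W'.toNat = 87 from rfl,
      show 'X'.toNat = 88 from rfl,
      show 'Y'.toNat = 89 from rfl,
      show 'Z'.toNat = 90 from rfl]
    omega
  · simp [String.ext_iff, hl]
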